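-- pv_equiv track=rewrite | github.com/arj1211/aoc | 2024/day6/main2.py | detect_in_loop
-- ===== SOURCE A (Python) =====
-- from typing import Dict, Generator, List, Optional, Sequence, Set, Tuple
--
-- def detect_in_loop(
--     coords_sequence: Sequence[Tuple[int, int, chr]]
-- ) -> Tuple[bool, Optional[List[Tuple[int, int]]], int]:
--     """
--     Detect if sequence contains a loop and return loop information.
--
--     Returns:
--         Tuple containing:
--         - bool: Whether loop was detected
--         - List: Loop sequence if found, None otherwise
--         - int: Length of the loop (0 if no loop)
--     """
--     position_history: Dict[Tuple[int, int, chr], int] = {}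
--
--     for i, pos in enumerate(coords_sequence):
--         if pos in position_history:
--             # Loop found - calculate loop sequence
--             loop_start = position_history[pos]
--             loop_sequence = list(coords_sequence[loop_start:i])
--             return True, loop_sequence, len(loop_sequence)
--         position_history[pos] = i
--
--     return False, None, 0
-- ===== SOURCE B (Python) =====
-- def detect_in_loop(coords_sequence):
--     """
--     Detect if sequence contains a loop and return loop information.
--
--     Two separate passes: pass 1 builds a table mapping each coordinate to the
--     index of its FIRST appearance; pass 2 finds the first index whose
--     coordinate first appeared strictly earlier.
--     """
--     first_index = {}
--     for i, pos in enumerate(coords_sequence):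
--         if pos not in first_index:
--             first_index[pos] = i
--
--     for i, pos in enumerate(coords_sequence):
--         j = first_index.get(pos, i)
--         if j < i:
--             loop_sequence = list(coords_sequence[j:i])
--             return True, loop_sequence, len(loop_sequence)
--
--     return False, None, 0
-- ===== Notes on version B (the rewrite author's own statement) =====
-- stated objective: alternative
-- what changed: A interleaves scanning and recording in one pass with an early exit on dict membership; B first builds a complete first-occurrence index table over the whole sequence (keeping only the earliest index per coordinate) and then, in a separate second pass, returns at the first index whose coordinate's first occurrence is strictly earlier.
import Mathlib
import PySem

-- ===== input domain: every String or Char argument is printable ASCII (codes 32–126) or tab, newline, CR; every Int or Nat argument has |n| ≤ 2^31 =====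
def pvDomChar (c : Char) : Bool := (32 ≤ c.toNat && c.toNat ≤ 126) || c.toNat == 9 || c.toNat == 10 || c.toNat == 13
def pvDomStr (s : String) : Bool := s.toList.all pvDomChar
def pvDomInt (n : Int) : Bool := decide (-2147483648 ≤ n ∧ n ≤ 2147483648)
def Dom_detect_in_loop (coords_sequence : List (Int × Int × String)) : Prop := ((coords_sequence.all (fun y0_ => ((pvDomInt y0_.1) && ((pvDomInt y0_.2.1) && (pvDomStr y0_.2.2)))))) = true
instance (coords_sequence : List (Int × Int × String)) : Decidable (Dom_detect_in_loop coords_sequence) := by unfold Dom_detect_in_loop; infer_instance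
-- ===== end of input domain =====

-- B replaces A's single interleaved scan-and-record pass with two separate passes:
-- a complete first-occurrence index table, then a scan for the first index whose
-- coordinate first appeared strictly earlier (objective: alternative decomposition).

-- ===== PORT A =====
def detectA_go (cs : List (Int × Int × String)) :
    List (Int × Int × String) → Int → PySem.Dict (Int × Int × String) Int →
    Bool × (Option (List (Int × Int × String))) × Int
  | [], _, _ => (false, none, 0)
  | pos :: rest, i, d =>
    match d.get? pos with
    | some loop_start =>
      let seq := PySem.List.slice cs (some loop_start) (some i)
      (true, some seq, (seq.length : Int))
    | none => detectA_go cs rest (i + 1) (d.insert pos i)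

def detect_in_loop (coords_sequence : List (Int × Int × String)) : Bool × (Option (List (Int × Int × String))) × Int :=
  detectA_go coords_sequence coords_sequence 0 PySem.Dict.empty

-- ===== PORT B =====
-- pass 1: first-occurrence index of every coordinate (never overwrite)
def buildFirst : List (Int × Int × String) → Int → PySem.Dict (Int × Int × String) Int →
    PySem.Dict (Int × Int × String) Int
  | [], _, d => d
  | pos :: rest, i, d =>
    buildFirst rest (i + 1) (if d.contains pos then d else d.insert pos i)

-- pass 2: first index whose coordinate first appeared strictly earlier
def scanB (cs : List (Int × Int × String)) (fi : PySem.Dict (Int × Int × String) Int) :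
    List (Int × Int × String) → Int → Bool × (Option (List (Int × Int × String))) × Int
  | [], _ => (false, none, 0)
  | pos :: rest, i =>
    let j := fi.getD pos i
    if j < i then
      let seq := PySem.List.slice cs (some j) (some i)
      (true, some seq, (seq.length : Int))
    else scanB cs fi rest (i + 1)

def detect_in_loop_alt (coords_sequence : List (Int × Int × String)) : Bool × (Option (List (Int × Int × String))) × Int :=
  scanB coords_sequence (buildFirst coords_sequence 0 PySem.Dict.empty) coords_sequence 0

-- ===== PRECONDITION & SPEC =====
def Spec_detect_in_loop (coords_sequence : List (Int × Int × String)) (out : Bool × (Option (List (Int × Int × String))) × Int) : Prop := out = detect_in_loop_alt coords_sequence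
instance (coords_sequence : List (Int × Int × String)) (out : Bool × (Option (List (Int × Int × String))) × Int) : Decidable (Spec_detect_in_loop coords_sequence out) := by unfold Spec_detect_in_loop; infer_instance

-- ===== CLAIM (what is proved, stated in full; the proofs are below) =====
def Claim_equal_detect_in_loop : Prop := ∀ (coords_sequence : List (Int × Int × String)), Dom_detect_in_loop coords_sequence → Spec_detect_in_loop coords_sequence (detect_in_loop coords_sequence)

-- ===== LEMMAS AND PROOFS =====

-- first index (offset by i) at which x occurs in a list
def fidx : List (Int × Int × String) → (Int × Int × String) → Int → Option Int
  | [], _, _ => none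
  | p :: r, x, i => if p = x then some i else fidx r x (i + 1)

theorem fidx_append (l1 l2 : List (Int × Int × String)) (x : Int × Int × String) (i : Int) :
    fidx (l1 ++ l2) x i = (fidx l1 x i).or (fidx l2 x (i + l1.length)) := by
  induction l1 generalizing i with
  | nil => simp [fidx]
  | cons p r ih =>
    by_cases h : p = x
    · simp [fidx, h]
    · simp only [List.cons_append, fidx, if_neg h, ih, List.length_cons]
      push_cast
      ring_nf

theorem fidx_bounds (l : List (Int × Int × String)) (x : Int × Int × String) (i j : Int)
    (h : fidx l x i = some j) : i ≤ j ∧ j < i + l.length := by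
  induction l generalizing i with
  | nil => simp [fidx] at h
  | cons p r ih =>
    simp only [fidx] at h
    split at h
    · cases h
      simp only [List.length_cons]
      push_cast
      omega
    · have := ih (i + 1) h
      simp only [List.length_cons]
      push_cast
      omega

theorem dict_get?_none_of_not_contains (d : PySem.Dict (Int × Int × String) Int)
    (k : Int × Int × String) (hc : ¬ d.contains k = true) : d.get? k = none := by
  have h2 := PySem.Dict.contains_eq_isSome_get? d k
  cases h' : d.get? k with
  | none => rfl
  | some v => rw [h'] at h2; simp at h2; exact absurd h2 hc

theorem buildFirst_get? (l : List (Int × Int × String)) (i : Int)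
    (d : PySem.Dict (Int × Int × String) Int) (x : Int × Int × String) :
    (buildFirst l i d).get? x = (d.get? x).or (fidx l x i) := by
  induction l generalizing i d with
  | nil => simp [buildFirst, fidx]
  | cons p r ih =>
    simp only [buildFirst, ih]
    by_cases hc : d.contains p = true
    · have hs : (d.get? p).isSome := by
        rw [← PySem.Dict.contains_eq_isSome_get?, hc]
      obtain ⟨v, hv⟩ := Option.isSome_iff_exists.mp hs
      by_cases hx : p = x
      · subst hx
        simp [fidx, hv, hc]
      · simp [fidx, hx, hc]
    · have hn : d.get? p = none := dict_get?_none_of_not_contains d p hc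
      rw [if_neg hc, PySem.Dict.get?_insert d p x i]
      by_cases hx : p = x
      · subst hx
        simp [fidx, hn]
      · rw [if_neg (fun h => hx h.symm)]
        simp [fidx, hx]

theorem main_eq (cs : List (Int × Int × String))
    (dB : PySem.Dict (Int × Int × String) Int)
    (hB : ∀ x, dB.get? x = fidx cs x 0) :
    ∀ (rest pre : List (Int × Int × String)) (dA : PySem.Dict (Int × Int × String) Int),
      cs = pre ++ rest → (∀ x, dA.get? x = fidx pre x 0) →
      detectA_go cs rest (pre.length : Int) dA = scanB cs dB rest (pre.length : Int) := by
  intro rest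
  induction rest with
  | nil => intro pre dA _ _; simp [detectA_go, scanB]
  | cons p r ih =>
    intro pre dA hcs hA
    have hBp : dB.get? p = (fidx pre p 0).or (some (pre.length : Int)) := by
      rw [hB p, hcs, fidx_append]
      simp [fidx]
    cases hf : fidx pre p 0 with
    | some j =>
      have hb := fidx_bounds pre p 0 j hf
      have hjlt : j < (pre.length : Int) := by omega
      rw [hf] at hBp
      simp only [detectA_go, hA p, hf, scanB, PySem.Dict.getD_eq_get?_getD, hBp, Option.or,
        Option.getD_some, if_pos hjlt]
    | none =>
      rw [hf] at hBp
      have hBD : dB.getD p (pre.length : Int) = (pre.length : Int) := by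
        rw [PySem.Dict.getD_eq_get?_getD, hBp]
        rfl
      have hlen : (pre.length : Int) + 1 = ((pre ++ [p]).length : Int) := by
        simp
      have hstep : detectA_go cs r ((pre ++ [p]).length : Int) (dA.insert p (pre.length : Int))
          = scanB cs dB r ((pre ++ [p]).length : Int) := by
        apply ih (pre ++ [p])
        · rw [hcs]; simp
        · intro x
          rw [fidx_append, PySem.Dict.get?_insert dA p x (pre.length : Int), hA x]
          by_cases hx : x = p
          · subst hx
            rw [if_pos rfl, hf]
            simp [fidx]
          · rw [if_neg hx]
            have hnp : fidx [p] x ((0 : Int) + pre.length) = none := by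
              simp [fidx, Ne.symm hx]
            rw [hnp]
            cases fidx pre x 0 <;> rfl
      simp only [detectA_go, hA p, hf, scanB, hBD]
      rw [if_neg (lt_irrefl _), hlen]
      exact hstep

-- ===== VERDICT (by name: the statement is the Claim_ definition above) =====
theorem detect_in_loop_spec : Claim_equal_detect_in_loop := by
  intro cs _
  unfold Spec_detect_in_loop detect_in_loop detect_in_loop_alt
  have h0 : ((([] : List (Int × Int × String)).length : Int)) = 0 := by simp
  have := main_eq cs (buildFirst cs 0 PySem.Dict.empty)
    (fun x => by rw [buildFirst_get? cs 0 PySem.Dict.empty x, PySem.Dict.get?_empty]; rfl)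
    cs [] PySem.Dict.empty (by simp)
    (fun x => by rw [PySem.Dict.get?_empty]; rfl)
  rw [h0] at this
  exact this
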